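-- pv_equiv track=rewrite | github.com/Dipali02/omniwish | test2.py | lengthOfSmallestSubsequence
-- ===== SOURCE A (Python) =====
-- def lengthOfSmallestSubsequence(K, v):
--     pq = []
--
--     for i in v:
--         pq.append(i)
--     pq.sort()
--
--     sum = 0
--     count = 0
--
--     while (len(pq) > 0 and sum < K):
--         sum = sum + pq[-1]
--         del pq[-1]
--         count = count + 1
--
--     if (sum < K):
--         return -1
--     return count
-- ===== SOURCE B (Python) =====
-- def lengthOfSmallestSubsequence(K, v):
--     if K <= 0:
--         return 0
--     prefix = []
--     s = 0
--     for x in sorted(v, reverse=True):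
--         s += x
--         prefix.append(s)
--     for i, p in enumerate(prefix):
--         if p >= K:
--             return i + 1
--     return -1
-- ===== Notes on version B (the rewrite author's own statement) =====
-- stated objective: alternative
-- what changed: Replaces the destructive sort-ascending-then-pop-from-the-back while loop with a non-mutating prefix-sum decomposition: sort descending, build the list of cumulative sums, then scan for the first prefix sum >= K (returning its 1-based index), with an immediate 0 for K <= 0 and -1 if no prefix reaches K.
import Mathlib
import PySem

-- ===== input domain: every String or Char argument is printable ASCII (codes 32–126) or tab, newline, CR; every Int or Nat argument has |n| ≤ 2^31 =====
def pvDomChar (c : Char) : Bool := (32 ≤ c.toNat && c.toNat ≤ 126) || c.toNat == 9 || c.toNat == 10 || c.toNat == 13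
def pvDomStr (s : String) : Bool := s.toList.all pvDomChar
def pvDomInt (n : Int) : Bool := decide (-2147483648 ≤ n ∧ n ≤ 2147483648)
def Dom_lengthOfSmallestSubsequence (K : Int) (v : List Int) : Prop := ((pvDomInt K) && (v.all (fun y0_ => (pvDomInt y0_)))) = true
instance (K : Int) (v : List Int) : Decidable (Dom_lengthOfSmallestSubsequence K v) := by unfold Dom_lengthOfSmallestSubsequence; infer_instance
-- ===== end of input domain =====

-- B replaces A's destructive pop-largest-from-the-back while loop by a non-mutating
-- prefix-sum decomposition over the descending sort (alternative structure, same cost).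

-- ===== PORT A =====
-- the while loop: while len(pq) > 0 and sum < K: sum += pq[-1]; del pq[-1]; count += 1
-- followed by: if sum < K: return -1; return count
def pvALoop (K : Int) (pq : List Int) (sum count : Int) : Int :=
  if h : pq ≠ [] ∧ sum < K then
    pvALoop K pq.dropLast (sum + pq.getLast h.1) (count + 1)
  else
    if sum < K then -1 else count
termination_by pq.length
decreasing_by
  have := h.1
  cases pq with
  | nil => simp at this
  | cons a t => simp

def lengthOfSmallestSubsequence (K : Int) (v : List Int) : Int :=
  -- pq = []; for i in v: pq.append(i); pq.sort()
  let pq0 := v.foldl (fun (acc : List Int) i => acc ++ [i]) []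
  let pq := PySem.List.sorted pq0 (fun x => x) false
  pvALoop K pq 0 0

-- ===== PORT B =====
-- second loop: for i, p in enumerate(prefix): if p >= K: return i + 1; return -1
def pvBScan (K : Int) : List Int → Int → Int
  | [], _ => -1
  | p :: rest, i => if K ≤ p then i + 1 else pvBScan K rest (i + 1)

def lengthOfSmallestSubsequence_alt (K : Int) (v : List Int) : Int :=
  if K ≤ 0 then 0
  else
    -- prefix = []; s = 0; for x in sorted(v, reverse=True): s += x; prefix.append(s)
    let fin := (PySem.List.sorted v (fun x => x) true).foldl
      (fun (acc : List Int × Int) x => (acc.1 ++ [acc.2 + x], acc.2 + x)) ([], 0)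
    pvBScan K fin.1 0

-- ===== PRECONDITION & SPEC =====
def Spec_lengthOfSmallestSubsequence (K : Int) (v : List Int) (out : Int) : Prop := out = lengthOfSmallestSubsequence_alt K v
instance (K : Int) (v : List Int) (out : Int) : Decidable (Spec_lengthOfSmallestSubsequence K v out) := by unfold Spec_lengthOfSmallestSubsequence; infer_instance

-- ===== CLAIM (what is proved, stated in full; the proofs are below) =====
def Claim_equal_lengthOfSmallestSubsequence : Prop := ∀ (K : Int) (v : List Int), Dom_lengthOfSmallestSubsequence K v → Spec_lengthOfSmallestSubsequence K v (lengthOfSmallestSubsequence K v)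

-- ===== LEMMAS AND PROOFS =====

-- the append-copy loop is the identity
theorem pvCopy_eq (v : List Int) : v.foldl (fun (acc : List Int) i => acc ++ [i]) [] = v := by
  have h : ∀ (l acc : List Int), l.foldl (fun acc i => acc ++ [i]) acc = acc ++ l := by
    intro l
    induction l with
    | nil => simp
    | cons x t ih => intro acc; simp [List.foldl, ih]
  simpa using h v []

-- abstract front-to-back form of A's while loop
def pvBRun (K : Int) : List Int → Int → Int → Int
  | [], s, c => if s < K then -1 else c
  | x :: r, s, c => if s < K then pvBRun K r (s + x) (c + 1) else c

theorem pvALoop_eq_bRun (K : Int) (l : List Int) (s c : Int) :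
    pvALoop K l s c = pvBRun K l.reverse s c := by
  induction l using List.reverseRecOn generalizing s c with
  | nil => rw [pvALoop]; simp [pvBRun]
  | append_singleton t x ih =>
    rw [pvALoop]
    by_cases hs : s < K
    · simp [hs, pvBRun, ih]
    · simp [hs, pvBRun]

theorem pvBRun_ge (K : Int) (d : List Int) (s c : Int) (h : ¬ s < K) :
    pvBRun K d s c = c := by
  cases d <;> simp [pvBRun, h]

-- prefix sums, structurally
def pvPrefixFrom (s : Int) : List Int → List Int
  | [] => []
  | x :: r => (s + x) :: pvPrefixFrom (s + x) r

theorem pvPrefix_foldl (d : List Int) (acc : List Int) (s : Int) :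
    (d.foldl (fun (a : List Int × Int) x => (a.1 ++ [a.2 + x], a.2 + x)) (acc, s)).1
      = acc ++ pvPrefixFrom s d := by
  induction d generalizing acc s with
  | nil => simp [pvPrefixFrom]
  | cons x r ih => simp [List.foldl, pvPrefixFrom, ih]

theorem pvBRun_eq_scan (K : Int) (d : List Int) (s c : Int) (hs : s < K) :
    pvBRun K d s c = pvBScan K (pvPrefixFrom s d) c := by
  induction d generalizing s c with
  | nil => simp [pvBRun, pvPrefixFrom, pvBScan, hs]
  | cons x r ih =>
    simp only [pvBRun, pvPrefixFrom, pvBScan, if_pos hs]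
    by_cases h : K ≤ s + x
    · rw [if_pos h, pvBRun_ge K r (s + x) (c + 1) (by omega)]
    · rw [if_neg h, ih (s + x) (c + 1) (by omega)]

-- sorted descending is the reverse of sorted ascending (Int values)
theorem pvDesc_eq_rev_asc (v : List Int) :
    PySem.List.sorted v (fun x => x) true = (PySem.List.sorted v (fun x => x) false).reverse := by
  apply PySem.List.eq_of_perm_of_pairwise_le_of_injective (key := fun x : Int => -x)
  · intro a b h; simpa using h
  · exact (PySem.List.sorted_perm v _ true).trans
      ((PySem.List.sorted_perm v _ false).symm.trans (List.reverse_perm _).symm)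
  · exact (PySem.List.sorted_pairwise_rev v (fun x => x) (κ := Int)).imp (by intro a b h; simpa using h)
  · rw [List.pairwise_reverse]
    exact (PySem.List.sorted_pairwise v (fun x => x) (κ := Int)).imp (by intro a b h; simpa using h)

-- ===== VERDICT (by name: the statement is the Claim_ definition above) =====
theorem lengthOfSmallestSubsequence_spec : Claim_equal_lengthOfSmallestSubsequence := by
  intro K v _
  unfold Spec_lengthOfSmallestSubsequence lengthOfSmallestSubsequence lengthOfSmallestSubsequence_alt
  rw [pvCopy_eq]
  by_cases hK : K ≤ 0
  · rw [if_pos hK, pvALoop]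
    have : ¬ (0 : Int) < K := by omega
    simp [this]
  · rw [if_neg hK]
    rw [pvALoop_eq_bRun, ← pvDesc_eq_rev_asc,
        pvBRun_eq_scan K _ 0 0 (by omega)]
    show _ = pvBScan K ((PySem.List.sorted v (fun x => x) true).foldl
      (fun (acc : List Int × Int) x => (acc.1 ++ [acc.2 + x], acc.2 + x)) ([], 0)).1 0
    rw [pvPrefix_foldl _ [] 0]
    simp
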